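-- pv_equiv track=rewrite | github.com/veloxio742/any2api | python/providers/common.py | _pick_active_item
-- ===== SOURCE A (Python) =====
-- from typing import Any, Callable, Protocol
--
-- def _string(value: Any) -> str:
--     if value is None:
--         return ""
--     return str(value).strip()
--
-- def _pick_active_item(items: Any, required_field: str) -> dict[str, Any]:
--     if not isinstance(items, list):
--         return {}
--     for item in items:
--         if isinstance(item, dict) and item.get("active") and _string(item.get(required_field)):
--             return item
--     for item in items:
--         if isinstance(item, dict) and _string(item.get(required_field)):
--             return item
--     return {}
-- ===== SOURCE B (Python) =====
-- def _string(value):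
--     if value is None:
--         return ""
--     return str(value).strip()
--
-- def _pick_active_item(items, required_field):
--     if not isinstance(items, list):
--         return {}
--     fallback = None
--     for item in items:
--         if isinstance(item, dict) and _string(item.get(required_field)):
--             if item.get("active"):
--                 return item
--             if fallback is None:
--                 fallback = item
--     return fallback if fallback is not None else {}
-- ===== Notes on version B (the rewrite author's own statement) =====
-- stated objective: alternative
-- what changed: Replaced A's two sequential passes over the list by a single pass that returns the first active item with the required field and records the first non-active candidate as a fallback.
import Mathlib
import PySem

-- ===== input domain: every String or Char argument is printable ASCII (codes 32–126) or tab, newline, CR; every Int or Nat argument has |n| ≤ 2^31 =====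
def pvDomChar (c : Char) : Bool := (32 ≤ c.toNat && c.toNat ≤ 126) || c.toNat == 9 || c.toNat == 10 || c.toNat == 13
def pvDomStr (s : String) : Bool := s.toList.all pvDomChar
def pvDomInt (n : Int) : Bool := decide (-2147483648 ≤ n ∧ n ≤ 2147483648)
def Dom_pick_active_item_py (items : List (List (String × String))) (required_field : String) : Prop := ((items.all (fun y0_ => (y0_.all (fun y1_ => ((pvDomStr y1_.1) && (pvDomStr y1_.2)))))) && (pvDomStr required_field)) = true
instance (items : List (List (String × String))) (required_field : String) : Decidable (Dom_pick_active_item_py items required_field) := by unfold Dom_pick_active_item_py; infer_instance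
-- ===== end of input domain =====

-- B replaces A's two sequential passes by one pass recording the first fallback candidate (objective: alternative decomposition, same cost).

-- ===== PORT A =====
-- item.get(k): first-match lookup in the association list (Python dict convention)
def pvGet (item : List (String × String)) (k : String) : Option String :=
  (item.find? (fun p => p.1 == k)).map (·.2)

-- _string(value): "" for None, else str(value).strip(); here values are strings
def pvString (v : Option String) : String :=
  match v with
  | none => ""
  | some s => PySem.Str.strip s

-- Python truthiness of an optional string: present and nonempty
def pvTruthy (v : Option String) : Bool :=
  match v with
  | none => false
  | some s => s != ""

-- first for-loop of A: first item with truthy "active" and truthy _string(item.get(required_field))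
def pick_loop1 (rf : String) : List (List (String × String)) → Option (List (String × String))
  | [] => none
  | it :: rest =>
    if pvTruthy (pvGet it "active") && (pvString (pvGet it rf) != "") then some it
    else pick_loop1 rf rest

-- second for-loop of A: first item with truthy _string(item.get(required_field))
def pick_loop2 (rf : String) : List (List (String × String)) → Option (List (String × String))
  | [] => none
  | it :: rest =>
    if pvString (pvGet it rf) != "" then some it
    else pick_loop2 rf rest

def pick_active_item_py (items : List (List (String × String))) (required_field : String) : List (String × String) :=
  match pick_loop1 required_field items with
  | some it => it
  | none =>
    match pick_loop2 required_field items with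
    | some it => it
    | none => []

-- ===== PORT B =====
-- single pass with a recorded fallback (B's loop)
def pick_go (rf : String) : List (List (String × String)) → Option (List (String × String)) → List (String × String)
  | [], fb => fb.getD []
  | it :: rest, fb =>
    if pvString (pvGet it rf) != "" then
      if pvTruthy (pvGet it "active") then it
      else pick_go rf rest (if fb.isNone then some it else fb)
    else pick_go rf rest fb

def pick_active_item_py_alt (items : List (List (String × String))) (required_field : String) : List (String × String) :=
  pick_go required_field items none

-- ===== PRECONDITION & SPEC =====
def Spec_pick_active_item_py (items : List (List (String × String))) (required_field : String) (out : List (String × String)) : Prop := out = pick_active_item_py_alt items required_field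
instance (items : List (List (String × String))) (required_field : String) (out : List (String × String)) : Decidable (Spec_pick_active_item_py items required_field out) := by unfold Spec_pick_active_item_py; infer_instance

-- ===== CLAIM (what is proved, stated in full; the proofs are below) =====
def Claim_equal_pick_active_item_py : Prop := ∀ (items : List (List (String × String))) (required_field : String), Dom_pick_active_item_py items required_field → Spec_pick_active_item_py items required_field (pick_active_item_py items required_field)

-- ===== LEMMAS AND PROOFS =====

-- B's single pass equals: first active match, else the fallback, else the first plain match.
lemma pick_go_eq (rf : String) (l : List (List (String × String))) :
    ∀ fb : Option (List (String × String)),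
      pick_go rf l fb =
        match pick_loop1 rf l with
        | some it => it
        | none =>
          match fb with
          | some x => x
          | none =>
            match pick_loop2 rf l with
            | some it => it
            | none => [] := by
  induction l with
  | nil =>
    intro fb
    cases fb <;> simp [pick_go, pick_loop1, pick_loop2]
  | cons it rest ih =>
    intro fb
    by_cases hg : (pvString (pvGet it rf) != "") = true
    · by_cases ha : pvTruthy (pvGet it "active") = true
      · simp [pick_go, pick_loop1, hg, ha]
      · cases fb with
        | none =>
          simp [pick_go, pick_loop1, pick_loop2, hg, ha, ih]
        | some x =>
          simp [pick_go, pick_loop1, hg, ha, ih]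
    · cases fb <;>
      simp [pick_go, pick_loop1, pick_loop2, hg, ih]

-- ===== VERDICT (by name: the statement is the Claim_ definition above) =====
theorem pick_active_item_py_spec : Claim_equal_pick_active_item_py := by
  intro items rf _
  unfold Spec_pick_active_item_py pick_active_item_py pick_active_item_py_alt
  rw [pick_go_eq]
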